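-- pv_equiv track=rewrite | github.com/LorenzoAgnolucci/Gutenberg | src/words.py | expected_runs_for_line
-- ===== SOURCE A (Python) =====
-- from typing import TextIO, List, Tuple
--
-- def expected_runs_for_line(line_length_combinations: List[List[int]]) -> List[List[int]]:
--     """
--     For each word length combinations of a line outputs an histogram that has non-zero values only where a word cut can be made.
--     :param line_length_combinations: A list of possible word lengths for a line of text
--     :return: An "histogram" that contains a "spike" whenever a word cut can be made
--     """
--     WORD_CUT_SPIKE = 15
--     runs_combinations = []
--     for line_length in line_length_combinations:
--         runs = [WORD_CUT_SPIKE]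
--         for run_length in line_length:
--             runs += [0] * (run_length + 1)
--             runs += [WORD_CUT_SPIKE]
--             runs += [0]
--
--         runs.pop()
--         runs_combinations.append(runs)
--
--     return runs_combinations
-- ===== SOURCE B (Python) =====
-- from typing import List
--
--
-- def expected_runs_for_line(line_length_combinations: List[List[int]]) -> List[List[int]]:
--     """Preallocate each histogram as an all-zero array of its computed total
--     length, then scatter the WORD_CUT_SPIKE values into it at the computed
--     spike positions (instead of growing the list by appends)."""
--     WORD_CUT_SPIKE = 15
--     runs_combinations = []
--     for line_length in line_length_combinations:
--         blocks = [max(run_length + 1, 0) for run_length in line_length]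
--         total = sum(blocks) + 2 * len(blocks)
--         runs = [0] * total
--         pos = 0
--         first = True
--         for b in blocks:
--             runs[pos] = WORD_CUT_SPIKE
--             pos += b + (1 if first else 2)
--             first = False
--         if blocks:
--             runs[pos] = WORD_CUT_SPIKE
--         runs_combinations.append(runs)
--     return runs_combinations
-- ===== Notes on version B (the rewrite author's own statement) =====
-- stated objective: alternative
-- what changed: B computes each histogram's total length and the per-word block sizes up front, preallocates an all-zero array, and scatters the spike values into it at computed positions, instead of A's incremental interleaved appends followed by a pop of the trailing zero.
import Mathlib
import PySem

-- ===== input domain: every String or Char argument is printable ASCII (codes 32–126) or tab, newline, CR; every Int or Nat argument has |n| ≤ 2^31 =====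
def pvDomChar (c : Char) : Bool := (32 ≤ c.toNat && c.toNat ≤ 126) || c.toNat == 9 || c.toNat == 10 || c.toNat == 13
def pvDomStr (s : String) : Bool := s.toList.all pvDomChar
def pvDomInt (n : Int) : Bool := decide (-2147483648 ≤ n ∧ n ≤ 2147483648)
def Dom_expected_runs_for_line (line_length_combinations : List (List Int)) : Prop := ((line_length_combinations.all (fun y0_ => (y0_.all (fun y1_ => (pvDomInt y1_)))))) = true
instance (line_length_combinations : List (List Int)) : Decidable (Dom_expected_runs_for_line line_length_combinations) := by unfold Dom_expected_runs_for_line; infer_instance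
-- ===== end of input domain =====

-- B preallocates each histogram as an all-zero array of its computed total length and
-- scatters the spikes at computed positions, instead of A's append-then-pop loop
-- (objective: alternative; same asymptotic cost).

-- ===== PORT A =====
-- literal transliteration of A: inner loop accumulates runs (Python [0]*n repeats max n 0 times
-- = List.replicate (…).toNat), then runs.pop() discards the last element (dropLast).
def expected_runs_for_line (line_length_combinations : List (List Int)) : List (List Int) :=
  line_length_combinations.foldl
    (fun runs_combinations line_length =>
      let runs := line_length.foldl
        (fun runs run_length =>
          runs ++ List.replicate (run_length + 1).toNat (0 : Int) ++ [15] ++ [0])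
        [15]
      runs_combinations ++ [runs.dropLast])
    []

-- ===== PORT B =====
-- state = (runs, pos, first); runs[pos] = 15 then pos += b + (1 if first else 2).
-- pos is always ≥ 0 here (it starts at 0 and each step adds b + 1 ≥ 1 with b ≥ 0),
-- so Python's runs[pos] is exactly List.set at pos.toNat.
def pvStepB (st : List Int × Int × Bool) (b : Int) : List Int × Int × Bool :=
  (st.1.set st.2.1.toNat 15, st.2.1 + b + (if st.2.2 then 1 else 2), false)

def expected_runs_for_line_alt (line_length_combinations : List (List Int)) : List (List Int) :=
  line_length_combinations.map (fun line_length =>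
    let blocks := line_length.map (fun run_length => max (run_length + 1) 0)
    let total : Int := blocks.sum + 2 * blocks.length
    let s := blocks.foldl pvStepB (List.replicate total.toNat 0, 0, true)
    if blocks.isEmpty then s.1 else s.1.set s.2.1.toNat 15)

-- ===== PRECONDITION & SPEC =====
def Spec_expected_runs_for_line (line_length_combinations : List (List Int)) (out : List (List Int)) : Prop := out = expected_runs_for_line_alt line_length_combinations
instance (line_length_combinations : List (List Int)) (out : List (List Int)) : Decidable (Spec_expected_runs_for_line line_length_combinations out) := by unfold Spec_expected_runs_for_line; infer_instance

-- ===== CLAIM (what is proved, stated in full; the proofs are below) =====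
def Claim_equal_expected_runs_for_line : Prop := ∀ (line_length_combinations : List (List Int)), Dom_expected_runs_for_line line_length_combinations → Spec_expected_runs_for_line line_length_combinations (expected_runs_for_line line_length_combinations)

-- ===== LEMMAS AND PROOFS =====

-- total space taken by a list of (nonnegative) block sizes, as a Nat
def pvS (bs : List Int) : Nat := (bs.map (fun b => b.toNat + 2)).sum

theorem pv_total_toNat (bs : List Int) (h : ∀ b ∈ bs, 0 ≤ b) :
    ((bs.sum + 2 * bs.length : Int)).toNat = pvS bs := by
  induction bs with
  | nil => simp [pvS]
  | cons b t ih =>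
    have hb : 0 ≤ b := h b (by simp)
    have ht : ∀ x ∈ t, 0 ≤ x := fun x hx => h x (by simp [hx])
    have hsum : 0 ≤ t.sum := List.sum_nonneg (fun x hx => ht x hx)
    simp only [List.sum_cons, List.length_cons, pvS, List.map_cons] at *
    rw [← ih ht]
    omega

-- writing at the length of the prefix
theorem pv_set_at_prefix (done xs : List Int) (v : Int) :
    (done ++ xs).set done.length v = done ++ xs.set 0 v := by
  induction done with
  | nil => simp
  | cons d t ih => simp [ih]

-- the scatter loop after the first element: each iteration writes a spike and leaves
-- b+1 zeros before the next write position
theorem pv_scatter_rest (bs : List Int) (h : ∀ b ∈ bs, 0 ≤ b) (done : List Int) :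
    bs.foldl pvStepB (done ++ List.replicate (pvS bs + 1) 0, (done.length : Int), false)
    = (done ++ bs.flatMap (fun b => 15 :: List.replicate (b.toNat + 1) (0 : Int)) ++ [0],
       ((done.length + pvS bs : Nat) : Int), false) := by
  induction bs generalizing done with
  | nil => simp [pvS]
  | cons b t ih =>
    have hb : 0 ≤ b := h b (by simp)
    have ht : ∀ x ∈ t, 0 ≤ x := fun x hx => h x (by simp [hx])
    have hS : pvS (b :: t) = b.toNat + 2 + pvS t := by simp [pvS]
    have h1 : (done ++ List.replicate (pvS (b :: t) + 1) (0 : Int)).set ((done.length : Int)).toNat 15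
        = (done ++ (15 : Int) :: List.replicate (b.toNat + 1) 0) ++ List.replicate (pvS t + 1) 0 := by
      rw [Int.toNat_natCast, pv_set_at_prefix, hS]
      rw [show b.toNat + 2 + pvS t + 1 = (b.toNat + 1 + 1) + (pvS t + 1) by omega]
      simp [List.replicate_add, List.replicate_succ]
    have h2 : (done.length : Int) + b + 2
        = (((done ++ (15 : Int) :: List.replicate (b.toNat + 1) 0).length : Nat) : Int) := by
      simp only [List.length_append, List.length_cons, List.length_replicate]
      push_cast; omega
    have hstep : pvStepB (done ++ List.replicate (pvS (b :: t) + 1) 0, (done.length : Int), false) b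
        = ((done ++ (15 : Int) :: List.replicate (b.toNat + 1) 0) ++ List.replicate (pvS t + 1) 0,
           (((done ++ (15 : Int) :: List.replicate (b.toNat + 1) 0).length : Nat) : Int), false) := by
      simp only [pvStepB, Bool.false_eq_true, if_false, h1, h2]
    rw [List.foldl_cons, hstep, ih ht]
    simp only [Prod.mk.injEq]
    refine ⟨by simp [List.flatMap_cons], ?_, trivial⟩
    simp only [List.length_append, List.length_cons, List.length_replicate, hS]
    push_cast; omega

-- length of the scattered pattern
theorem pv_pattern_len (bs : List Int) :
    (bs.flatMap (fun b => 15 :: List.replicate (b.toNat + 1) (0 : Int))).length = pvS bs := by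
  induction bs with
  | nil => simp [pvS]
  | cons b t ih => simp [pvS, List.flatMap_cons] at *; omega

-- writing at the last position (the slot preallocated as the popped trailing zero)
theorem pv_set_last (ys : List Int) : (ys ++ [0]).set ys.length (15 : Int) = ys ++ [15] := by
  rw [pv_set_at_prefix]; rfl

-- (max (l+1) 0).toNat = (l+1).toNat, lifted through the flatMap over the mapped blocks
theorem pv_mapmax (rest : List Int) :
    (rest.map (fun l => max (l + 1) 0)).flatMap
      (fun b => [0] ++ List.replicate b.toNat (0 : Int) ++ [15])
    = rest.flatMap (fun l => [0] ++ List.replicate (l + 1).toNat (0 : Int) ++ [15]) := by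
  induction rest with
  | nil => rfl
  | cons r t ih =>
    simp only [List.map_cons, List.flatMap_cons, ih]
    have hmx : (max (r + 1) 0).toNat = (r + 1).toNat := by omega
    rw [hmx]

-- shifting the spike out front: the loop's pattern followed by the final spike equals
-- spike-first separator blocks
theorem pv_shiftB (bs : List Int) :
    bs.flatMap (fun b => 15 :: List.replicate (b.toNat + 1) (0 : Int)) ++ [15]
    = [15] ++ bs.flatMap (fun b => [0] ++ List.replicate b.toNat (0 : Int) ++ [15]) := by
  induction bs with
  | nil => simp
  | cons b t ih =>
    simp only [List.flatMap_cons, List.cons_append, List.append_assoc, ih]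
    simp [List.replicate_succ]

-- A's inner foldl just appends a block per element.
theorem pv_innerA (line : List Int) (init : List Int) :
    line.foldl
      (fun runs run_length =>
        runs ++ List.replicate (run_length + 1).toNat (0 : Int) ++ [15] ++ [0]) init
    = init ++ line.flatMap
        (fun l => List.replicate (l + 1).toNat (0 : Int) ++ [15] ++ [0]) := by
  induction line generalizing init with
  | nil => simp
  | cons x rest ih => simp [List.foldl_cons, List.flatMap]

-- shifting the trailing zero of each A-block onto the front of the next block
theorem pv_shiftA (rest : List Int) :
    (0 : Int) :: rest.flatMap (fun l => List.replicate (l + 1).toNat (0 : Int) ++ [15] ++ [0])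
    = rest.flatMap (fun l => [0] ++ List.replicate (l + 1).toNat (0 : Int) ++ [15]) ++ [0] := by
  induction rest with
  | nil => simp
  | cons r rs ih =>
    simp only [List.flatMap_cons]
    rw [show ((0:Int) :: (((List.replicate (r + 1).toNat (0:Int) ++ [15]) ++ [0]) ++
        rs.flatMap (fun l => List.replicate (l + 1).toNat (0 : Int) ++ [15] ++ [0])))
      = ([0] ++ (List.replicate (r + 1).toNat (0:Int) ++ [15])) ++
        ((0:Int) :: rs.flatMap (fun l => List.replicate (l + 1).toNat (0 : Int) ++ [15] ++ [0]))
      by simp]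
    rw [ih]
    simp

-- A's per-line value in closed form
theorem pv_lineA (line : List Int) :
    ((line.foldl
      (fun runs run_length =>
        runs ++ List.replicate (run_length + 1).toNat (0 : Int) ++ [15] ++ [0]) [15]).dropLast)
    = (match line with
       | [] => []
       | x :: rest => [15] ++ (List.replicate (x + 1).toNat (0 : Int) ++ [15]) ++
           rest.flatMap (fun l => [0] ++ List.replicate (l + 1).toNat (0 : Int) ++ [15])) := by
  rw [pv_innerA]
  cases line with
  | nil => simp
  | cons x rest =>
    simp only [List.flatMap_cons]
    rw [show (([15] : List Int) ++ ((List.replicate (x + 1).toNat (0:Int) ++ [15] ++ [0]) ++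
        rest.flatMap (fun l => List.replicate (l + 1).toNat (0 : Int) ++ [15] ++ [0])))
      = ((15:Int) :: (List.replicate (x + 1).toNat (0:Int) ++ [15])) ++
        ((0:Int) :: rest.flatMap (fun l => List.replicate (l + 1).toNat (0 : Int) ++ [15] ++ [0]))
      by simp]
    rw [pv_shiftA]
    rw [← List.append_assoc, List.dropLast_concat]
    simp

-- A's outer foldl with singleton appends is a map
theorem pv_outer (f : List Int → List Int) (xs : List (List Int)) (acc : List (List Int)) :
    xs.foldl (fun a line => a ++ [f line]) acc = acc ++ xs.map f := by
  induction xs generalizing acc with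
  | nil => simp
  | cons x rest ih => simp [List.foldl_cons, ih]

-- B's per-line value equals A's closed form
theorem pv_lineB (line : List Int) :
    (let blocks := line.map (fun run_length => max (run_length + 1) 0)
     let total : Int := blocks.sum + 2 * blocks.length
     let s := blocks.foldl pvStepB (List.replicate total.toNat 0, 0, true)
     if blocks.isEmpty then s.1 else s.1.set s.2.1.toNat 15)
    = (match line with
       | [] => []
       | x :: rest => [15] ++ (List.replicate (x + 1).toNat (0 : Int) ++ [15]) ++
           rest.flatMap (fun l => [0] ++ List.replicate (l + 1).toNat (0 : Int) ++ [15])) := by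
  dsimp only
  cases line with
  | nil => simp
  | cons x rest =>
    simp only [List.map_cons, List.isEmpty_cons, Bool.false_eq_true, if_false]
    set b0 : Int := max (x + 1) 0 with hb0
    set bs : List Int := rest.map (fun l => max (l + 1) 0) with hbs
    have hb0n : 0 ≤ b0 := le_max_right _ _
    have hbsn : ∀ b ∈ bs, 0 ≤ b := by
      intro b hb; rw [hbs] at hb
      obtain ⟨l, _, rfl⟩ := List.mem_map.mp hb
      exact le_max_right _ _
    have htot : (((b0 :: bs).sum + 2 * (b0 :: bs).length : Int)).toNat = pvS (b0 :: bs) :=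
      pv_total_toNat _ (by
        intro b hb
        rcases List.mem_cons.mp hb with rfl | hb
        · exact hb0n
        · exact hbsn b hb)
    have hS : pvS (b0 :: bs) = b0.toNat + 2 + pvS bs := by simp [pvS]
    -- the first iteration writes the spike at index 0
    have h1 : (List.replicate (((b0 :: bs).sum + 2 * (b0 :: bs).length : Int)).toNat (0 : Int)).set (0 : Int).toNat 15
        = (([15] ++ List.replicate b0.toNat (0 : Int)) ++ List.replicate (pvS bs + 1) 0) := by
      rw [htot, hS, show b0.toNat + 2 + pvS bs = (1 + b0.toNat) + (pvS bs + 1) by omega]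
      simp [List.replicate_add, List.replicate_succ]
    have h2 : (0 : Int) + b0 + 1
        = ((([15] ++ List.replicate b0.toNat (0 : Int)).length : Nat) : Int) := by
      simp only [List.length_append, List.length_cons, List.length_replicate, List.length_nil]
      push_cast; omega
    have hstep : pvStepB (List.replicate (((b0 :: bs).sum + 2 * (b0 :: bs).length : Int)).toNat 0, 0, true) b0
        = (([15] ++ List.replicate b0.toNat (0 : Int)) ++ List.replicate (pvS bs + 1) 0,
           ((([15] ++ List.replicate b0.toNat (0 : Int)).length : Nat) : Int), false) := by
      simp only [pvStepB, h1]
      rw [if_pos trivial, h2]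
    rw [List.foldl_cons, hstep, pv_scatter_rest bs hbsn]
    -- the final write fills the last slot
    have hlen : ([15] ++ List.replicate b0.toNat (0 : Int)).length + pvS bs
        = (([15] ++ List.replicate b0.toNat (0 : Int)) ++
           bs.flatMap (fun (b : Int) => (15 : Int) :: List.replicate (b.toNat + 1) (0 : Int))).length := by
      simp only [List.length_append, pv_pattern_len]
    rw [Int.toNat_natCast, hlen, pv_set_last]
    have hx : b0.toNat = (x + 1).toNat := by rw [hb0]; omega
    rw [List.append_assoc, pv_shiftB, hbs, pv_mapmax, hx]
    simp

-- ===== VERDICT (by name: the statement is the Claim_ definition above) =====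
theorem expected_runs_for_line_spec : Claim_equal_expected_runs_for_line := by
  intro lcs _
  unfold Spec_expected_runs_for_line expected_runs_for_line expected_runs_for_line_alt
  rw [pv_outer (fun line =>
      (line.foldl
        (fun runs run_length =>
          runs ++ List.replicate (run_length + 1).toNat (0 : Int) ++ [15] ++ [0]) [15]).dropLast)]
  simp only [List.nil_append]
  exact List.map_congr_left (fun line _ => by rw [pv_lineA line, ← pv_lineB line])
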